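-- pv_equiv track=rewrite | github.com/amv69/BIOSC1640 | flask/bioutil.py | reading_frame
-- ===== SOURCE A (Python) =====
-- def reading_frame(dna_sequence):
--     """
--     Returns the reading frame of the sequence, assuming that it
--     encodes a maximal ORF. Frame 0 = starts at the first
--     nt, 1 = skip the first nt, 2 = skip the first 2. -1 means
--     the sequence has no maximal ORF. No checking for ATGs
--     is performed.
--
--     If there is more than one valid ORF, the lowest frame
--     is favored.
--     """
--
--     stop_codons = {'TAG': 1, 'TGA': 1, 'TAA': 1}
--
--     dna_sequence = dna_sequence.upper()
--
--     for frame in range(3):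
--         for k in range(frame, len(dna_sequence)-3, 3): #skip the last 3 nts always
--             codon = dna_sequence[k:(k+3)]
--             if codon in stop_codons:
--                 break
--         else:
--             return frame
--     return -1
-- ===== SOURCE B (Python) =====
-- def reading_frame(dna_sequence):
--     """Single linear pass: record which frames (i % 3) contain a stop codon,
--     then return the lowest unblocked frame, or -1."""
--     seq = dna_sequence.upper()
--     stops = ('TAG', 'TGA', 'TAA')
--     blocked = [False, False, False]
--     for i in range(len(seq) - 3):
--         if seq[i:i+3] in stops:
--             blocked[i % 3] = True
--     for f in range(3):
--         if not blocked[f]: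
--             return f
--     return -1
-- ===== Notes on version B (the rewrite author's own statement) =====
-- stated objective: alternative
-- what changed: Replaced the per-frame stride-3 scan with early break/for-else by one linear pass that marks each frame i%3 blocked when a stop codon starts at i, then returns the lowest unblocked frame; trades A's early exit for a single uniform pass.
import Mathlib
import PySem

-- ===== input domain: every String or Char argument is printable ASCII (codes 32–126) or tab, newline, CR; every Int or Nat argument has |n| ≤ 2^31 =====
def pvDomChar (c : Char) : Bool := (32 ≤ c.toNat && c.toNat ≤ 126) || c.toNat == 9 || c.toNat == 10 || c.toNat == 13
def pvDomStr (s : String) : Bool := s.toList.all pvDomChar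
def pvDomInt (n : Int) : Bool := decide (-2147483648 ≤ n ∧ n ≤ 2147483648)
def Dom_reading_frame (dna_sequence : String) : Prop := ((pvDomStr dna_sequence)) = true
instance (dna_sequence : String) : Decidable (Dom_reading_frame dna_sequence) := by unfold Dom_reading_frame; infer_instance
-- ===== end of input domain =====

-- B replaces A's three per-frame stride-3 scans (with break/for-else) by one linear pass marking blocked frames.

-- ===== PORT A =====
-- stop_codons = {'TAG': 1, 'TGA': 1, 'TAA': 1}
def pvStops : PySem.Dict String Int := PySem.Dict.ofList [("TAG", 1), ("TGA", 1), ("TAA", 1)]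

-- inner loop 'for k in range(frame, len-3, 3): … if codon in stop_codons: break' — true iff a stop codon is hit
def pvAFrameBlocked (s : String) (frame : Int) : Bool :=
  (PySem.List.pyRange frame (PySem.Str.len s - 3) 3).any
    (fun k => pvStops.contains (PySem.Str.slice s (some k) (some (k + 3))))

-- outer 'for frame in range(3): … else: return frame' then 'return -1'
def pvALoop (s : String) : List Int → Int
  | [] => -1
  | f :: rest => if pvAFrameBlocked s f then pvALoop s rest else f

def reading_frame (dna_sequence : String) : Int :=
  pvALoop (PySem.Str.upper dna_sequence) (PySem.List.pyRange 0 3 1)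

-- ===== PORT B =====
-- 'seq[i:i+3] in stops' with stops = ('TAG', 'TGA', 'TAA')
def pvIsStop (c : String) : Bool := c == "TAG" || c == "TGA" || c == "TAA"

def reading_frame_alt (dna_sequence : String) : Int :=
  let s := PySem.Str.upper dna_sequence
  -- blocked = [False, False, False]; for i in range(len(seq)-3): if stop at i: blocked[i % 3] = True
  let blocked : Bool × Bool × Bool :=
    (PySem.List.pyRange 0 (PySem.Str.len s - 3) 1).foldl
      (fun b i =>
        if pvIsStop (PySem.Str.slice s (some i) (some (i + 3))) then
          if PySem.Int.mod i 3 = 0 then (true, b.2.1, b.2.2)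
          else if PySem.Int.mod i 3 = 1 then (b.1, true, b.2.2)
          else (b.1, b.2.1, true)
        else b)
      (false, false, false)
  -- for f in range(3): if not blocked[f]: return f; return -1
  if !blocked.1 then 0
  else if !blocked.2.1 then 1
  else if !blocked.2.2 then 2
  else -1

-- ===== PRECONDITION & SPEC =====
def Spec_reading_frame (dna_sequence : String) (out : Int) : Prop := out = reading_frame_alt dna_sequence
instance (dna_sequence : String) (out : Int) : Decidable (Spec_reading_frame dna_sequence out) := by unfold Spec_reading_frame; infer_instance

-- ===== CLAIM (what is proved, stated in full; the proofs are below) =====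
def Claim_equal_reading_frame : Prop := ∀ (dna_sequence : String), Dom_reading_frame dna_sequence → Spec_reading_frame dna_sequence (reading_frame dna_sequence)

-- ===== LEMMAS AND PROOFS =====

-- membership in the literal stop-codon dict is the literal tuple membership test
theorem pvContains_eq_isStop (c : String) : pvStops.contains c = pvIsStop c := by
  have h : pvStops = PySem.Dict.mk [("TAG", 1), ("TGA", 1), ("TAA", 1)] := by decide
  rw [h]
  simp [pvIsStop, PySem.Dict.contains_mk]
  simp [BEq.comm, Bool.or_assoc]

theorem pvMod3 (i : Int) : PySem.Int.mod i 3 = i % 3 :=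
  PySem.Int.mod_eq_emod_of_pos (by norm_num)

-- fold invariant: each component of 'blocked' records whether some index of its residue class hits a stop
theorem pvFold_spec (s : String) (l : List Int) (b : Bool × Bool × Bool) :
    l.foldl
      (fun b i =>
        if pvIsStop (PySem.Str.slice s (some i) (some (i + 3))) then
          if PySem.Int.mod i 3 = 0 then (true, b.2.1, b.2.2)
          else if PySem.Int.mod i 3 = 1 then (b.1, true, b.2.2)
          else (b.1, b.2.1, true)
        else b)
      b =
    (b.1 || l.any (fun i => pvIsStop (PySem.Str.slice s (some i) (some (i + 3))) && decide (i % 3 = 0)),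
     b.2.1 || l.any (fun i => pvIsStop (PySem.Str.slice s (some i) (some (i + 3))) && decide (i % 3 = 1)),
     b.2.2 || l.any (fun i => pvIsStop (PySem.Str.slice s (some i) (some (i + 3))) && decide (i % 3 = 2))) := by
  induction l generalizing b with
  | nil => simp
  | cons i l ih =>
    rw [List.foldl_cons, ih]
    simp only [List.any_cons]
    have hm := pvMod3 i
    obtain ⟨b0, b1, b2⟩ := b
    by_cases hp : pvIsStop (PySem.Str.slice s (some i) (some (i + 3))) = true
    · have h3 : i % 3 = 0 ∨ i % 3 = 1 ∨ i % 3 = 2 := by omega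
      rcases h3 with h | h | h
      · rw [if_pos hp, if_pos (show PySem.Int.mod i 3 = 0 by rw [hm, h])]
        simp [hp, h]
      · rw [if_pos hp, if_neg (show ¬ PySem.Int.mod i 3 = 0 by rw [hm]; omega),
            if_pos (show PySem.Int.mod i 3 = 1 by rw [hm, h])]
        simp [hp, h]
      · rw [if_pos hp, if_neg (show ¬ PySem.Int.mod i 3 = 0 by rw [hm]; omega),
            if_neg (show ¬ PySem.Int.mod i 3 = 1 by rw [hm]; omega)]
        simp [hp, h]
    · rw [if_neg hp]
      simp only [Bool.not_eq_true] at hp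
      simp [hp]

-- A's stride-3 scan of frame f equals B's residue-class filter of the single pass
theorem pvAny_stride (s : String) (f : Int) (hf : 0 ≤ f) (hf3 : f < 3) :
    pvAFrameBlocked s f =
    (PySem.List.pyRange 0 (PySem.Str.len s - 3) 1).any
      (fun i => pvIsStop (PySem.Str.slice s (some i) (some (i + 3))) && decide (i % 3 = f)) := by
  unfold pvAFrameBlocked
  rw [Bool.eq_iff_iff]
  simp only [List.any_eq_true, Bool.and_eq_true, decide_eq_true_eq,
    PySem.List.mem_pyRange_iff_of_pos (by norm_num : (0:Int) < 3), PySem.List.mem_pyRange_one,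
    pvContains_eq_isStop]
  constructor
  · rintro ⟨k, ⟨hk1, hk2, hk3⟩, hstop⟩
    exact ⟨k, ⟨by omega, hk2⟩, hstop, by omega⟩
  · rintro ⟨k, ⟨hk1, hk2⟩, hstop, hmod⟩
    exact ⟨k, ⟨by omega, hk2, by omega⟩, hstop⟩

-- ===== VERDICT (by name: the statement is the Claim_ definition above) =====
theorem reading_frame_spec : Claim_equal_reading_frame := by
  intro dna _
  unfold Spec_reading_frame
  simp only [reading_frame, reading_frame_alt]
  generalize PySem.Str.upper dna = s
  rw [show PySem.List.pyRange 0 3 1 = [0, 1, 2] from by decide]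
  rw [pvFold_spec]
  simp only [Bool.false_or]
  rw [← pvAny_stride s 0 (by norm_num) (by norm_num),
      ← pvAny_stride s 1 (by norm_num) (by norm_num),
      ← pvAny_stride s 2 (by norm_num) (by norm_num)]
  simp only [pvALoop]
  cases pvAFrameBlocked s 0 <;> cases pvAFrameBlocked s 1 <;> cases pvAFrameBlocked s 2 <;> simp
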